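-- pv_equiv track=rewrite | github.com/webclinic017/trading-spy-iron-condor | src/safety/handoff_governance.py | infer_risk_tier
-- ===== SOURCE A (Python) =====
-- from typing import Any, Mapping, Sequence
--
-- HIGH_RISK_PATH_PREFIXES: tuple[str, ...] = (
--     "src/orchestrator/",
--     "src/risk/",
--     "src/safety/",
--     "scripts/autonomous_trader.py",
--     "scripts/iron_condor_",
--     "scripts/manage_iron_condor_positions.py",
--     ".github/workflows/daily-trading.yml",
--     ".github/workflows/iron-condor-",
-- )
--
-- CRITICAL_RISK_PATH_PREFIXES: tuple[str, ...] = (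
--     ".github/workflows/production-",
--     "scripts/deploy_",
-- )
--
-- def _normalize_path(path: str) -> str:
--     return path.replace("\\", "/").lstrip("./")
--
-- def infer_risk_tier(changed_paths: Sequence[str]) -> str:
--     """Infer a conservative risk tier from changed paths."""
--     if not changed_paths:
--         return "low"
--
--     has_medium = False
--     has_high = False
--     for raw_path in changed_paths:
--         path = _normalize_path(raw_path)
--         if not path:
--             continue
--         if any(path.startswith(prefix) for prefix in CRITICAL_RISK_PATH_PREFIXES):
--             return "critical"
--         if any(path.startswith(prefix) for prefix in HIGH_RISK_PATH_PREFIXES):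
--             has_high = True
--             continue
--         if path.startswith(("src/", "scripts/", ".github/workflows/")):
--             has_medium = True
--
--     if has_high:
--         return "high"
--     if has_medium:
--         return "medium"
--     return "low"
-- ===== SOURCE B (Python) =====
-- HIGH_RISK_PATH_PREFIXES = (
--     "src/orchestrator/",
--     "src/risk/",
--     "src/safety/",
--     "scripts/autonomous_trader.py",
--     "scripts/iron_condor_",
--     "scripts/manage_iron_condor_positions.py",
--     ".github/workflows/daily-trading.yml",
--     ".github/workflows/iron-condor-",
-- )
--
-- CRITICAL_RISK_PATH_PREFIXES = (
--     ".github/workflows/production-",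
--     "scripts/deploy_",
-- )
--
-- _TIER_TABLE = (
--     (CRITICAL_RISK_PATH_PREFIXES, "critical"),
--     (HIGH_RISK_PATH_PREFIXES, "high"),
--     (("src/", "scripts/", ".github/workflows/"), "medium"),
-- )
--
--
-- def infer_risk_tier(changed_paths):
--     """Infer a conservative risk tier from changed paths."""
--     paths = [p for p in (r.replace("\\", "/").lstrip("./") for r in changed_paths) if p]
--     for prefixes, tier in _TIER_TABLE:
--         if any(p.startswith(prefixes) for p in paths):
--             return tier
--     return "low"
-- ===== Notes on version B (the rewrite author's own statement) =====
-- stated objective: alternative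
-- what changed: Tier-major staged passes instead of A's path-major loop: B normalizes all paths once, then scans the list once per tier (critical, then high, then medium) via a data-driven tier table and returns the first tier with a match, replacing A's early-return-plus-two-flags single pass; the tuple-argument startswith calls replace A's per-prefix any() generators.
import Mathlib
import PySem

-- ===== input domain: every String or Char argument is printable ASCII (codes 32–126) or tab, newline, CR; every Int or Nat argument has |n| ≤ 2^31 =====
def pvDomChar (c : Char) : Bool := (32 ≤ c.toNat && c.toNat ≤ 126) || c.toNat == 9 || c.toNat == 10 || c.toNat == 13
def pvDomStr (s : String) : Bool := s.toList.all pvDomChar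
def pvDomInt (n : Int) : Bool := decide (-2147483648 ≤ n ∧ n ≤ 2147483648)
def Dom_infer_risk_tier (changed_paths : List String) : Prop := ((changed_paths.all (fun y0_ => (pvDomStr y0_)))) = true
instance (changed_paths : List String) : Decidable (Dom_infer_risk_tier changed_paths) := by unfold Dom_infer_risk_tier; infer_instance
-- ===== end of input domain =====

-- B replaces A's path-major early-return-plus-flags loop by tier-major staged passes
-- over the once-normalized path list (objective: alternative).

-- shared module constants (both Pythons use the same tuples)
def pvHighPrefixes : List String :=
  ["src/orchestrator/", "src/risk/", "src/safety/", "scripts/autonomous_trader.py",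
   "scripts/iron_condor_", "scripts/manage_iron_condor_positions.py",
   ".github/workflows/daily-trading.yml", ".github/workflows/iron-condor-"]

def pvCriticalPrefixes : List String :=
  [".github/workflows/production-", "scripts/deploy_"]

-- _normalize_path: replace('\\','/') then lstrip("./") (drop leading chars from the set {'.','/'}); exact
def pvNorm (path : String) : String :=
  String.ofList ((PySem.Str.replace path "\\" "/").toList.dropWhile (fun c => c == '.' || c == '/'))

-- ===== PORT A =====
-- the for-loop with early return "critical" and the has_medium/has_high flags
def pvALoop : List String → Bool → Bool → String
  | [], has_medium, has_high =>
      if has_high then "high" else if has_medium then "medium" else "low"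
  | raw_path :: rest, has_medium, has_high =>
      let path := pvNorm raw_path
      if path = "" then pvALoop rest has_medium has_high
      else if pvCriticalPrefixes.any (fun p => PySem.Str.startswith path p) then "critical"
      else if pvHighPrefixes.any (fun p => PySem.Str.startswith path p) then
        pvALoop rest has_medium true
      else if PySem.Str.startswith path "src/" || PySem.Str.startswith path "scripts/"
              || PySem.Str.startswith path ".github/workflows/" then
        pvALoop rest true has_high
      else pvALoop rest has_medium has_high

def infer_risk_tier (changed_paths : List String) : String :=
  if changed_paths = [] then "low" else pvALoop changed_paths false false

-- ===== PORT B =====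
def pvMediumPrefixes : List String := ["src/", "scripts/", ".github/workflows/"]

-- _TIER_TABLE
def pvTierTable : List (List String × String) :=
  [(pvCriticalPrefixes, "critical"), (pvHighPrefixes, "high"), (pvMediumPrefixes, "medium")]

-- the for-loop over the tier table: return the first tier any path matches
def pvTierLoop : List (List String × String) → List String → String
  | [], _ => "low"
  | (prefixes, tier) :: rest, paths =>
      if paths.any (fun p => prefixes.any (fun q => PySem.Str.startswith p q)) then tier
      else pvTierLoop rest paths

def infer_risk_tier_alt (changed_paths : List String) : String :=
  pvTierLoop pvTierTable ((changed_paths.map pvNorm).filter (fun p => p ≠ ""))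

-- ===== PRECONDITION & SPEC =====
def Spec_infer_risk_tier (changed_paths : List String) (out : String) : Prop := out = infer_risk_tier_alt changed_paths
instance (changed_paths : List String) (out : String) : Decidable (Spec_infer_risk_tier changed_paths out) := by unfold Spec_infer_risk_tier; infer_instance

-- ===== CLAIM (what is proved, stated in full; the proofs are below) =====
def Claim_equal_infer_risk_tier : Prop := ∀ (changed_paths : List String), Dom_infer_risk_tier changed_paths → Spec_infer_risk_tier changed_paths (infer_risk_tier changed_paths)

-- ===== LEMMAS AND PROOFS =====

def pvCritB (p : String) : Bool := pvCriticalPrefixes.any (fun q => PySem.Str.startswith p q)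
def pvHighB (p : String) : Bool := pvHighPrefixes.any (fun q => PySem.Str.startswith p q)
def pvMedB (p : String) : Bool := pvMediumPrefixes.any (fun q => PySem.Str.startswith p q)

def pvPaths (l : List String) : List String := (l.map pvNorm).filter (fun p => p ≠ "")

-- characterization of A's loop by the three any-predicates over the normalized nonempty paths
set_option maxHeartbeats 1000000 in
lemma pv_aLoop_char (l : List String) : ∀ (hm hh : Bool),
    pvALoop l hm hh
      = if (pvPaths l).any pvCritB then "critical"
        else if hh || (pvPaths l).any pvHighB then "high"
        else if hm || (pvPaths l).any pvMedB then "medium"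
        else "low" := by
  induction l with
  | nil => intro hm hh; simp [pvALoop, pvPaths]
  | cons raw rest ih =>
    intro hm hh
    simp only [pvALoop]
    by_cases h0 : pvNorm raw = ""
    · have hp : pvPaths (raw :: rest) = pvPaths rest := by
        simp [pvPaths, h0]
      rw [if_pos h0, ih, hp]
    · have hp : pvPaths (raw :: rest) = pvNorm raw :: pvPaths rest := by
        simp [pvPaths, h0]
      rw [if_neg h0, hp]
      simp only [List.any_cons]
      cases h1 : pvCritB (pvNorm raw) with
      | true => simp [pvCritB] at h1; simp [h1]
      | false =>
        have h1' : (pvCriticalPrefixes.any (fun q => PySem.Str.startswith (pvNorm raw) q)) = false := h1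
        rw [h1']
        simp only [Bool.false_eq_true, reduceIte, Bool.false_or]
        cases h2 : pvHighB (pvNorm raw) with
        | true =>
          have h2' : (pvHighPrefixes.any (fun q => PySem.Str.startswith (pvNorm raw) q)) = true := h2
          rw [h2', if_pos rfl, ih]
          simp
        | false =>
          have h2' : (pvHighPrefixes.any (fun q => PySem.Str.startswith (pvNorm raw) q)) = false := h2
          rw [h2']
          simp only [Bool.false_eq_true, reduceIte]
          cases h3 : (PySem.Str.startswith (pvNorm raw) "src/"
                || PySem.Str.startswith (pvNorm raw) "scripts/"
                || PySem.Str.startswith (pvNorm raw) ".github/workflows/") with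
          | true =>
            have h3' : pvMedB (pvNorm raw) = true := by
              simpa [pvMedB, pvMediumPrefixes, Bool.or_assoc] using h3
            rw [if_pos rfl, ih]
            simp [h3']
          | false =>
            have h3' : pvMedB (pvNorm raw) = false := by
              simpa [pvMedB, pvMediumPrefixes, Bool.or_assoc] using h3
            rw [if_neg (by simp), ih]
            simp [h3']

-- ===== VERDICT (by name: the statement is the Claim_ definition above) =====
theorem infer_risk_tier_spec : Claim_equal_infer_risk_tier := by
  intro changed_paths _
  unfold Spec_infer_risk_tier infer_risk_tier infer_risk_tier_alt
  have hb : pvTierLoop pvTierTable (pvPaths changed_paths)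
      = if (pvPaths changed_paths).any pvCritB then "critical"
        else if (pvPaths changed_paths).any pvHighB then "high"
        else if (pvPaths changed_paths).any pvMedB then "medium"
        else "low" := by
    simp [pvTierTable, pvTierLoop, pvCritB, pvHighB, pvMedB]
  by_cases hnil : changed_paths = []
  · subst hnil; simp [pvTierLoop, pvTierTable]
  · rw [if_neg hnil, pv_aLoop_char]
    show _ = pvTierLoop pvTierTable (pvPaths changed_paths)
    rw [hb]; simp
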